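-- pv_equiv track=rewrite | github.com/AyushAggarwal1/ghostlight | ghostlight/utils/snippets.py | earliest_line_and_snippet
-- ===== SOURCE A (Python) =====
-- from typing import List, Tuple, Optional
--
-- def _find_line_index(lines: List[str], needle: str) -> Optional[int]:
--     """Return 0-based line index containing needle, else None."""
--     if not needle:
--         return None
--     for idx, line in enumerate(lines):
--         if needle in line:
--             return idx
--     return None
--
-- def earliest_line_and_snippet(text: str, filtered: List[Tuple[str, str, List[str]]]) -> Tuple[int, str]:
--     """Compute earliest 1-based line number across matches and exact line snippet.
--
--     If no match lines are found, returns (1, first line or first 200 chars).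
--     """
--     if not text:
--         return 1, ""
--     lines = text.splitlines() or [text]
--     earliest_idx: Optional[int] = None
--     for _bucket, _name, matches in filtered:
--         for m in matches:
--             idx = _find_line_index(lines, m)
--             if idx is not None:
--                 if earliest_idx is None or idx < earliest_idx:
--                     earliest_idx = idx
--     if earliest_idx is None:
--         # Fallback: return first non-empty line or first 200 chars
--         for i, l in enumerate(lines):
--             if l.strip():
--                 return i + 1, l[:200]
--         return 1, (text[:200])
--     # Exact line content, trimmed to reasonable length
--     line_text = lines[earliest_idx]
--     return earliest_idx + 1, line_text[:500]
-- ===== SOURCE B (Python) =====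
-- from typing import List, Tuple
--
-- def earliest_line_and_snippet(text: str, filtered: List[Tuple[str, str, List[str]]]) -> Tuple[int, str]:
--     if not text:
--         return 1, ""
--     lines = text.splitlines() or [text]
--     needles = [m for _bucket, _name, matches in filtered for m in matches if m]
--     for i, line in enumerate(lines):
--         if any(m in line for m in needles):
--             return i + 1, line[:500]
--     for i, l in enumerate(lines):
--         if l.strip():
--             return i + 1, l[:200]
--     return 1, text[:200]
-- ===== Notes on version B (the rewrite author's own statement) =====
-- stated objective: faster
-- what changed: A scans needle-by-needle (each needle walks the line list to its first match, absent needles walk all lines) and folds the minimum index; B flattens the non-empty needles once and does a single line-major scan that stops at the first line containing any needle.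
import Mathlib
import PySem

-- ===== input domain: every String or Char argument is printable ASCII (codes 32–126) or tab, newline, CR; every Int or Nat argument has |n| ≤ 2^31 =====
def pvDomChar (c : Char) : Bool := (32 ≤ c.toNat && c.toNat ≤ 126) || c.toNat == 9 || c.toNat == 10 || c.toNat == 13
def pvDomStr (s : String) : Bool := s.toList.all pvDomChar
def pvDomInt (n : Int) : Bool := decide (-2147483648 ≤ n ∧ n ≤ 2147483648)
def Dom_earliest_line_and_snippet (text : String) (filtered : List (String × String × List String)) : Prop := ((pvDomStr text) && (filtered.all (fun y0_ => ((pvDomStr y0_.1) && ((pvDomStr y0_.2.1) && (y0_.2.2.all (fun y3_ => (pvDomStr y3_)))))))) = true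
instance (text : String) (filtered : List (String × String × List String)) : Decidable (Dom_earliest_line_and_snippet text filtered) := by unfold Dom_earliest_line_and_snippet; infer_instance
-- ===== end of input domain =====

-- B replaces A's needle-major scan (first matching line per needle, fold the minimum)
-- by a single line-major scan returning at the first line containing any non-empty needle;
-- objective: faster (measured): B stops at the earliest matching line instead of one full pass per needle.


-- ===== PORT A =====
-- _find_line_index's enumerate loop, carrying the running index
def pvFindLineGo (needle : String) : List String → Nat → Option Nat
  | [], _ => none
  | l :: rest, i => if PySem.Str.isIn needle l then some i else pvFindLineGo needle rest (i + 1)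

def pvFindLineIndex (lines : List String) (needle : String) : Option Nat :=
  if needle = "" then none else pvFindLineGo needle lines 0

-- the nested loop over filtered/matches updating earliest_idx
def pvEarliestIdxA (lines : List String) (filtered : List (String × String × List String)) : Option Nat :=
  filtered.foldl
    (fun acc t => t.2.2.foldl
      (fun acc m =>
        match pvFindLineIndex lines m with
        | none => acc
        | some idx =>
          match acc with
          | none => some idx
          | some e => if idx < e then some idx else acc)
      acc)
    none

-- the fallback loop: first line with non-empty strip, else first 200 chars of text
def pvFallbackA (text : String) : List String → Nat → Int × String
  | [], _ => (1, PySem.Str.slice text none (some 200))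
  | l :: rest, i =>
    if PySem.Str.strip l ≠ "" then ((i : Int) + 1, PySem.Str.slice l none (some 200))
    else pvFallbackA text rest (i + 1)

def pvBodyA (text : String) (filtered : List (String × String × List String)) (lines : List String) : Int × String :=
  match pvEarliestIdxA lines filtered with
  | none => pvFallbackA text lines 0
  | some idx => ((idx : Int) + 1, PySem.Str.slice (PySem.List.pyGetD lines (idx : Int) "") none (some 500))

def earliest_line_and_snippet (text : String) (filtered : List (String × String × List String)) : Int × String :=
  if text = "" then (1, "")
  else pvBodyA text filtered (if PySem.Str.splitlines text = [] then [text] else PySem.Str.splitlines text)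

-- ===== PORT B =====
-- single line-major scan: return at the first line containing any needle
def pvScanB (needles : List String) : List String → Nat → Option (Int × String)
  | [], _ => none
  | l :: rest, i =>
    if needles.any (fun m => PySem.Str.isIn m l) then
      some ((i : Int) + 1, PySem.Str.slice l none (some 500))
    else pvScanB needles rest (i + 1)

def pvFallbackB (text : String) : List String → Nat → Int × String
  | [], _ => (1, PySem.Str.slice text none (some 200))
  | l :: rest, i =>
    if PySem.Str.strip l ≠ "" then ((i : Int) + 1, PySem.Str.slice l none (some 200))
    else pvFallbackB text rest (i + 1)

def pvBodyB (text : String) (filtered : List (String × String × List String)) (lines : List String) : Int × String :=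
  match pvScanB (filtered.flatMap (fun t => t.2.2.filter (fun m => m ≠ ""))) lines 0 with
  | some r => r
  | none => pvFallbackB text lines 0

def earliest_line_and_snippet_alt (text : String) (filtered : List (String × String × List String)) : Int × String :=
  if text = "" then (1, "")
  else pvBodyB text filtered (if PySem.Str.splitlines text = [] then [text] else PySem.Str.splitlines text)

-- ===== PRECONDITION & SPEC =====
def Spec_earliest_line_and_snippet (text : String) (filtered : List (String × String × List String)) (out : Int × String) : Prop := out = earliest_line_and_snippet_alt text filtered
instance (text : String) (filtered : List (String × String × List String)) (out : Int × String) : Decidable (Spec_earliest_line_and_snippet text filtered out) := by unfold Spec_earliest_line_and_snippet; infer_instance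

-- ===== CLAIM (what is proved, stated in full; the proofs are below) =====
def Claim_equal_earliest_line_and_snippet : Prop := ∀ (text : String) (filtered : List (String × String × List String)), Dom_earliest_line_and_snippet text filtered → Spec_earliest_line_and_snippet text filtered (earliest_line_and_snippet text filtered)

-- ===== LEMMAS AND PROOFS =====

-- option-minimum, the value A's accumulator update computes
def pvOmin : Option Nat → Option Nat → Option Nat
  | a, none => a
  | none, some y => some y
  | some x, some y => some (min x y)

lemma pvOmin_none_left (b : Option Nat) : pvOmin none b = b := by cases b <;> rfl

lemma pvOmin_none_right (a : Option Nat) : pvOmin a none = a := by cases a <;> rfl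

lemma pvOmin_some_zero_left (b : Option Nat) : pvOmin (some 0) b = some 0 := by
  cases b <;> simp [pvOmin]

lemma pvOmin_some_zero_right (a : Option Nat) : pvOmin a (some 0) = some 0 := by
  cases a <;> simp [pvOmin]

lemma pvOmin_assoc (a b c : Option Nat) : pvOmin (pvOmin a b) c = pvOmin a (pvOmin b c) := by
  cases a <;> cases b <;> cases c <;> simp [pvOmin, Nat.min_assoc]

lemma pvOmin_map_succ (a b : Option Nat) :
    pvOmin (a.map (· + 1)) (b.map (· + 1)) = (pvOmin a b).map (· + 1) := by
  cases a <;> cases b <;> simp [pvOmin, Nat.succ_min_succ]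

-- A's find loop is findIdx? shifted by the running index
lemma pvFindLineGo_eq (needle : String) (lines : List String) (i : Nat) :
    pvFindLineGo needle lines i
      = (lines.findIdx? (fun l => PySem.Str.isIn needle l)).map (fun k => i + k) := by
  induction lines generalizing i with
  | nil => rfl
  | cons l rest ih =>
    simp only [pvFindLineGo, List.findIdx?_cons]
    by_cases h : PySem.Str.isIn needle l = true
    · rw [if_pos h, if_pos h]
      exact congrArg some (Nat.add_zero i).symm
    · rw [if_neg h, if_neg h, ih, Option.map_map]
      cases rest.findIdx? (fun l => PySem.Str.isIn needle l) with
      | none => rfl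
      | some k => exact congrArg some (by omega : i + 1 + k = i + (k + 1))

-- merging one needle into the any-predicate takes the option-minimum of first indices
lemma pvFindIdx_any_cons (m : String) (ms : List String) (lines : List String) :
    lines.findIdx? (fun l => (m :: ms).any (fun n => PySem.Str.isIn n l))
      = pvOmin (lines.findIdx? (fun l => PySem.Str.isIn m l))
               (lines.findIdx? (fun l => ms.any (fun n => PySem.Str.isIn n l))) := by
  induction lines with
  | nil => rfl
  | cons l rest ih =>
    simp only [List.findIdx?_cons]
    rw [List.any_cons]
    by_cases h1 : PySem.Str.isIn m l = true
    · rw [if_pos (show (PySem.Str.isIn m l || ms.any (fun n => PySem.Str.isIn n l)) = true by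
          rw [h1]; exact Bool.true_or _),
        if_pos h1, pvOmin_some_zero_left]
    · have h1' : PySem.Str.isIn m l = false := by rwa [Bool.not_eq_true] at h1
      by_cases h2 : (ms.any (fun n => PySem.Str.isIn n l)) = true
      · rw [if_pos (show (PySem.Str.isIn m l || ms.any (fun n => PySem.Str.isIn n l)) = true by
            rw [h1', Bool.false_or]; exact h2),
          if_neg h1, if_pos h2, pvOmin_some_zero_right]
      · rw [if_neg (show ¬ ((PySem.Str.isIn m l || ms.any (fun n => PySem.Str.isIn n l)) = true) by
            rw [h1', Bool.false_or]; exact h2),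
          if_neg h1, if_neg h2, ih, pvOmin_map_succ]

-- folding the option-minimum of single-needle first indices = first index of the any-predicate
lemma pvFold_omin (lines : List String) (ms : List String) (acc : Option Nat) :
    ms.foldl (fun a m => pvOmin a (lines.findIdx? (fun l => PySem.Str.isIn m l))) acc
      = pvOmin acc (lines.findIdx? (fun l => ms.any (fun n => PySem.Str.isIn n l))) := by
  induction ms generalizing acc with
  | nil =>
    simp only [List.foldl_nil, List.any_nil]
    have h0 : lines.findIdx? (fun _ : String => false) = none := by
      simp [List.findIdx?_eq_none_iff]
    rw [h0, pvOmin_none_right]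
  | cons m ms ih =>
    simp only [List.foldl_cons]
    rw [ih, pvFindIdx_any_cons, pvOmin_assoc]

-- A's accumulator update is the option-minimum
lemma pvStepA_eq (lines : List String) (acc : Option Nat) (m : String) :
    (match pvFindLineIndex lines m with
     | none => acc
     | some idx =>
       match acc with
       | none => some idx
       | some e => if idx < e then some idx else acc)
      = pvOmin acc (pvFindLineIndex lines m) := by
  cases h : pvFindLineIndex lines m with
  | none => cases acc <;> rfl
  | some idx =>
    cases acc with
    | none => rfl
    | some e =>
      by_cases hlt : idx < e <;> simp [pvOmin, hlt] <;> omega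

-- the inner fold over matches = fold over the non-empty matches only
lemma pvInner_eq (lines : List String) (ms : List String) (acc : Option Nat) :
    ms.foldl (fun a m => pvOmin a (pvFindLineIndex lines m)) acc
      = (ms.filter (fun m => m ≠ "")).foldl
          (fun a m => pvOmin a (lines.findIdx? (fun l => PySem.Str.isIn m l))) acc := by
  induction ms generalizing acc with
  | nil => rfl
  | cons m ms ih =>
    simp only [List.foldl_cons]
    by_cases h : m = ""
    · subst h
      have hf : ("" :: ms).filter (fun m => m ≠ "") = ms.filter (fun m => m ≠ "") := by simp
      have hnone : pvFindLineIndex lines "" = none := by rw [pvFindLineIndex, if_pos rfl]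
      have h0 : pvOmin acc (pvFindLineIndex lines "") = acc := by
        rw [hnone, pvOmin_none_right]
      rw [hf, h0]
      exact ih acc
    · have hf : (m :: ms).filter (fun m => m ≠ "") = m :: ms.filter (fun m => m ≠ "") := by
        simp [h]
      have hm : pvFindLineIndex lines m = lines.findIdx? (fun l => PySem.Str.isIn m l) := by
        rw [pvFindLineIndex, if_neg h, pvFindLineGo_eq]
        cases lines.findIdx? (fun l => PySem.Str.isIn m l) with
        | none => rfl
        | some k => exact congrArg some (Nat.zero_add k)
      rw [hf]
      simp only [List.foldl_cons]
      rw [hm]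
      exact ih _

-- the nested fold over filtered = fold over the flattened non-empty needle list
lemma pvNested_eq (lines : List String) (filtered : List (String × String × List String))
    (acc : Option Nat) :
    filtered.foldl
      (fun acc t => t.2.2.foldl (fun a m => pvOmin a (pvFindLineIndex lines m)) acc) acc
      = (filtered.flatMap (fun t => t.2.2.filter (fun m => m ≠ ""))).foldl
          (fun a m => pvOmin a (lines.findIdx? (fun l => PySem.Str.isIn m l))) acc := by
  induction filtered generalizing acc with
  | nil => rfl
  | cons t ts ih =>
    simp only [List.foldl_cons, List.flatMap_cons]
    rw [List.foldl_append, ih, pvInner_eq]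

-- A's whole needle phase = findIdx? of the any-predicate over the flattened needles
lemma pvEarliestIdxA_eq (lines : List String) (filtered : List (String × String × List String)) :
    pvEarliestIdxA lines filtered
      = lines.findIdx? (fun l =>
          (filtered.flatMap (fun t => t.2.2.filter (fun m => m ≠ ""))).any
            (fun m => PySem.Str.isIn m l)) := by
  unfold pvEarliestIdxA
  have hstep : (fun (acc : Option Nat) (m : String) =>
      match pvFindLineIndex lines m with
      | none => acc
      | some idx =>
        match acc with
        | none => some idx
        | some e => if idx < e then some idx else acc)
      = fun a m => pvOmin a (pvFindLineIndex lines m) := by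
    funext acc m
    exact pvStepA_eq lines acc m
  simp only [hstep]
  rw [pvNested_eq, pvFold_omin, pvOmin_none_left]

-- B's scan = findIdx? of the any-predicate, packaged with the snippet
lemma pvScanB_eq (needles : List String) (lines : List String) (i : Nat) :
    pvScanB needles lines i
      = (lines.findIdx? (fun l => needles.any (fun m => PySem.Str.isIn m l))).map
          (fun k => (((i + k : Nat) : Int) + 1, PySem.Str.slice (lines.getD k "") none (some 500))) := by
  induction lines generalizing i with
  | nil => rfl
  | cons l rest ih =>
    simp only [pvScanB, List.findIdx?_cons]
    by_cases h : (needles.any (fun m => PySem.Str.isIn m l)) = true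
    · rw [if_pos h, if_pos h]
      show some (((i : Int)) + 1, PySem.Str.slice l none (some 500))
        = some ((((i + 0 : Nat)) : Int) + 1, PySem.Str.slice ((l :: rest).getD 0 "") none (some 500))
      rw [Nat.add_zero, List.getD_cons_zero]
    · rw [if_neg h, if_neg h, ih, Option.map_map]
      cases rest.findIdx? (fun l => needles.any (fun m => PySem.Str.isIn m l)) with
      | none => rfl
      | some k =>
        show some ((((i + 1 + k : Nat)) : Int) + 1, PySem.Str.slice (rest.getD k "") none (some 500))
          = some ((((i + (k + 1) : Nat)) : Int) + 1, PySem.Str.slice ((l :: rest).getD (k + 1) "") none (some 500))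
        have h1 : i + 1 + k = i + (k + 1) := by omega
        rw [h1, List.getD_cons_succ]

-- the two fallback loops are the same recursion
lemma pvFallback_eq (text : String) (lines : List String) (i : Nat) :
    pvFallbackA text lines i = pvFallbackB text lines i := by
  induction lines generalizing i with
  | nil => rfl
  | cons l rest ih =>
    by_cases h : PySem.Str.strip l ≠ "" <;> simp [pvFallbackA, pvFallbackB, h, ih]

-- the two bodies agree on any line list
lemma pvBody_eq (text : String) (filtered : List (String × String × List String))
    (lines : List String) : pvBodyA text filtered lines = pvBodyB text filtered lines := by
  unfold pvBodyA pvBodyB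
  rw [pvEarliestIdxA_eq, pvScanB_eq]
  cases hk : lines.findIdx? (fun l =>
      (filtered.flatMap (fun t => t.2.2.filter (fun m => m ≠ ""))).any
        (fun m => PySem.Str.isIn m l)) with
  | none => exact pvFallback_eq text lines 0
  | some k =>
    show ((k : Int) + 1, PySem.Str.slice (PySem.List.pyGetD lines (k : Int) "") none (some 500))
      = ((((0 + k : Nat)) : Int) + 1, PySem.Str.slice (lines.getD k "") none (some 500))
    rw [Nat.zero_add, PySem.List.pyGetD_natCast]

-- ===== VERDICT (by name: the statement is the Claim_ definition above) =====
theorem earliest_line_and_snippet_spec : Claim_equal_earliest_line_and_snippet := by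
  intro text filtered _
  unfold Spec_earliest_line_and_snippet earliest_line_and_snippet earliest_line_and_snippet_alt
  by_cases ht : text = ""
  · rw [if_pos ht, if_pos ht]
  · rw [if_neg ht, if_neg ht]
    exact pvBody_eq text filtered _
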